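-- pv_equiv track=rewrite | github.com/jfblg/Tracktime-UZE | src/models/startlist/startlist_alg.py | get_index_even_count
-- ===== SOURCE A (Python) =====
-- def get_index_even_count(length):
--
--     new_index_list = []
--     x = length
--
--     for index in range(0, length):
--
--         if x == 0:
--             x += 1
--         elif x % 2 == 0:
--             x -= 2
--         else:
--             x += 2
--
--         new_index_list.append(x)
--
--     return new_index_list
-- ===== SOURCE B (Python) =====
-- def get_index_even_count(length):
--     if length % 2 == 1:
--         return [length + 2 * (i + 1) for i in range(length)]
--     half = length // 2
--     return [length - 2 * (i + 1) if i < half else 1 + 2 * (i - half)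
--             for i in range(length)]
-- ===== Notes on version B (the rewrite author's own statement) =====
-- stated objective: alternative
-- what changed: Replaced the sequential state-machine loop (mutating x each iteration) by a closed-form per-index formula split on the parity of length, built with a single comprehension.
import Mathlib
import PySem

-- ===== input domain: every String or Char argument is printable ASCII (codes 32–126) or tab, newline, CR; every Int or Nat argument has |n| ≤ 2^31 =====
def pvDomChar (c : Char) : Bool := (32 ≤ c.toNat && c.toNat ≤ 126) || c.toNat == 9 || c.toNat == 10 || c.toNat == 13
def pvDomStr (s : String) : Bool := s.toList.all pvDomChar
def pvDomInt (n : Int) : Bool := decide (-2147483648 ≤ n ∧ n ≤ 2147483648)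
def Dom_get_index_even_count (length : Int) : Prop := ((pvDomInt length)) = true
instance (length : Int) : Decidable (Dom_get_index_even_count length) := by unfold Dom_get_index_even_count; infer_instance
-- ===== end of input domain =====

-- B replaces A's sequential state-machine loop by a closed-form per-index formula (parity split on length); alternative decomposition, same cost.


-- ===== PORT A =====
def get_index_even_count (length : Int) : List Int :=
  ((PySem.List.pyRange 0 length 1).foldl
    (fun (st : Int × List Int) _ =>
      let x := if st.1 = 0 then st.1 + 1
               else if PySem.Int.mod st.1 2 = 0 then st.1 - 2
               else st.1 + 2
      (x, st.2 ++ [x]))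
    (length, [])).2

-- ===== PORT B =====
def get_index_even_count_alt (length : Int) : List Int :=
  if PySem.Int.mod length 2 = 1 then
    (PySem.List.pyRange 0 length 1).map (fun i => length + 2 * (i + 1))
  else
    let half := PySem.Int.floordiv length 2
    (PySem.List.pyRange 0 length 1).map
      (fun i => if i < half then length - 2 * (i + 1) else 1 + 2 * (i - half))

-- ===== PRECONDITION & SPEC =====
def Spec_get_index_even_count (length : Int) (out : List Int) : Prop := out = get_index_even_count_alt length
instance (length : Int) (out : List Int) : Decidable (Spec_get_index_even_count length out) := by unfold Spec_get_index_even_count; infer_instance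

-- ===== CLAIM (what is proved, stated in full; the proofs are below) =====
def Claim_equal_get_index_even_count : Prop := ∀ (length : Int), Dom_get_index_even_count length → Spec_get_index_even_count length (get_index_even_count length)

-- ===== LEMMAS AND PROOFS =====

-- closed-form per-index value (proof-side mirror of B's formulas, merged into one function)
def pvF (length i : Int) : Int :=
  if length % 2 = 1 then length + 2 * (i + 1)
  else if i < length / 2 then length - 2 * (i + 1) else 1 + 2 * (i - length / 2)

-- state of A's loop after n iterations
def pvX (length : Int) (n : Nat) : Int :=
  if length % 2 = 1 then length + 2 * n
  else if (n : Int) ≤ length / 2 then length - 2 * n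
  else 2 * ((n : Int) - length / 2) - 1

lemma pv_main (length : Int) (hpos : 0 < length) :
    ∀ n : Nat, (n : Int) ≤ length →
      ((PySem.List.pyRange 0 (n : Int) 1).foldl
        (fun (st : Int × List Int) _ =>
          let x := if st.1 = 0 then st.1 + 1
                   else if PySem.Int.mod st.1 2 = 0 then st.1 - 2
                   else st.1 + 2
          (x, st.2 ++ [x]))
        (length, []))
      = (pvX length n, (PySem.List.pyRange 0 (n : Int) 1).map (pvF length)) := by
  intro n hn
  induction n with
  | zero =>
      rw [show ((0 : Nat) : Int) = 0 from rfl,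
        PySem.List.pyRange_one_eq_nil (le_refl (0 : Int))]
      simp only [List.foldl_nil, List.map_nil, Prod.mk.injEq, and_true]
      unfold pvX
      push_cast
      split_ifs <;> omega
  | succ n ih =>
      have hn' : (n : Int) ≤ length := by push_cast at hn ⊢; omega
      have hr : PySem.List.pyRange 0 ((n : Int) + 1) 1
          = PySem.List.pyRange 0 (n : Int) 1 ++ [(n : Int)] :=
        PySem.List.pyRange_one_succ_right (by positivity)
      push_cast
      rw [hr, List.foldl_append, List.map_append, ih hn']
      simp only [List.foldl_cons, List.foldl_nil, List.map_cons, List.map_nil]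
      have hm : ∀ a : Int, PySem.Int.mod a 2 = a % 2 :=
        fun a => PySem.Int.mod_eq_emod_of_pos (by norm_num)
      simp only [hm]
      have key : (if pvX length n = 0 then pvX length n + 1
                  else if pvX length n % 2 = 0 then pvX length n - 2
                  else pvX length n + 2) = pvX length (n + 1)
                ∧ pvX length (n + 1) = pvF length (n : Int) := by
        unfold pvX pvF
        push_cast
        split_ifs <;> omega
      simp only [Prod.mk.injEq]
      refine ⟨key.1, ?_⟩
      rw [key.1.symm] at key ⊢
      rw [key.1, key.2]

lemma pv_alt_eq (length : Int) :
    get_index_even_count_alt length = (PySem.List.pyRange 0 length 1).map (pvF length) := by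
  unfold get_index_even_count_alt pvF
  have hm : PySem.Int.mod length 2 = length % 2 :=
    PySem.Int.mod_eq_emod_of_pos (by norm_num)
  have hd : PySem.Int.floordiv length 2 = length / 2 :=
    PySem.Int.floordiv_eq_ediv_of_pos (by norm_num)
  rw [hm, hd]
  split_ifs with h
  · simp
  · simp

-- ===== VERDICT (by name: the statement is the Claim_ definition above) =====
theorem get_index_even_count_spec : Claim_equal_get_index_even_count := by
  intro length _
  unfold Spec_get_index_even_count
  rw [pv_alt_eq]
  by_cases hpos : 0 < length
  · have h := pv_main length hpos length.toNat (by omega)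
    have hc : ((length.toNat : Int)) = length := by omega
    rw [hc] at h
    unfold get_index_even_count
    rw [h]
  · have hnil : PySem.List.pyRange 0 length 1 = [] :=
      PySem.List.pyRange_one_eq_nil (by omega)
    unfold get_index_even_count
    rw [hnil]
    simp
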